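-- pv_equiv track=rewrite | github.com/mthezeng/euler-solutions | p033.py | digit_diff
-- ===== SOURCE A (Python) =====
-- def digit_diff(a, b):
--     a_lst, b_lst = list(str(a)), list(str(b))
--     count = 0
--     for i in a_lst:
--         if i in b_lst and a % 10 and b % 10:
--             count += 1
--             del b_lst[b_lst.index(i)]
--     return count
-- ===== SOURCE B (Python) =====
-- def digit_diff(a, b):
--     if a % 10 == 0 or b % 10 == 0:
--         return 0
--     sa, sb = list(str(a)), list(str(b))
--     return sum(min(sa.count(d), sb.count(d)) for d in dict.fromkeys(sa))
-- ===== Notes on version B (the rewrite author's own statement) =====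
-- stated objective: simpler
-- what changed: Hoists the loop-invariant a%10/b%10 guard into one early return and computes the multiset-intersection size as a sum of per-distinct-digit minimum counts, instead of scanning a's digits while deleting matched digits from a mutable copy of b's digit list.
import Mathlib
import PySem

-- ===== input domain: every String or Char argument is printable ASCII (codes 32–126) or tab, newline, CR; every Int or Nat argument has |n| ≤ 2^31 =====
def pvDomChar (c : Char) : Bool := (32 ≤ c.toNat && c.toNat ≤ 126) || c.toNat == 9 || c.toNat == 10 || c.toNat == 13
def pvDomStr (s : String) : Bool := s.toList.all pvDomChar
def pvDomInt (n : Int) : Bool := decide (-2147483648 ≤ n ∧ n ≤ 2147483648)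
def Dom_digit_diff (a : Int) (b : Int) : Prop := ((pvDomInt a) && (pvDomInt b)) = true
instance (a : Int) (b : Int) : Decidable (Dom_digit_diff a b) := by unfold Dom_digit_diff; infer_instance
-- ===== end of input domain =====

-- B hoists the loop-invariant a%10/b%10 guard into an early return and sums per-distinct-digit
-- minimum counts instead of scanning a's digits while deleting matches from a copy of b's digits (simpler).

-- ===== PORT A =====
-- a_lst = list(str(a)); b_lst = list(str(b)); state of the loop = (count, b_lst)
-- for i in a_lst: if i in b_lst and a % 10 and b % 10: count += 1; del b_lst[b_lst.index(i)]
-- (del b_lst[b_lst.index(i)] removes the FIRST occurrence of i, exactly List.erase since i ∈ b_lst)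
def digit_diff (a : Int) (b : Int) : Int :=
  ((PySem.Int.toStr a).toList.foldl (fun (st : Int × List Char) i =>
      if i ∈ st.2 ∧ PySem.Int.mod a 10 ≠ 0 ∧ PySem.Int.mod b 10 ≠ 0 then
        (st.1 + 1, st.2.erase i)
      else st) (0, (PySem.Int.toStr b).toList)).1

-- ===== PORT B =====
-- if a % 10 == 0 or b % 10 == 0: return 0
-- sa, sb = list(str(a)), list(str(b)); return sum(min(sa.count(d), sb.count(d)) for d in dict.fromkeys(sa))
def digit_diff_alt (a : Int) (b : Int) : Int :=
  if PySem.Int.mod a 10 = 0 ∨ PySem.Int.mod b 10 = 0 then 0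
  else
    ((PySem.List.dedup (PySem.Int.toStr a).toList).map
      (fun d => (min ((PySem.Int.toStr a).toList.count d) ((PySem.Int.toStr b).toList.count d) : Int))).sum

-- ===== PRECONDITION & SPEC =====
def Spec_digit_diff (a : Int) (b : Int) (out : Int) : Prop := out = digit_diff_alt a b
instance (a : Int) (b : Int) (out : Int) : Decidable (Spec_digit_diff a b out) := by unfold Spec_digit_diff; infer_instance

-- ===== CLAIM (what is proved, stated in full; the proofs are below) =====
def Claim_equal_digit_diff : Prop := ∀ (a : Int) (b : Int), Dom_digit_diff a b → Spec_digit_diff a b (digit_diff a b)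

-- ===== LEMMAS AND PROOFS =====

-- When the guard is false, A's loop never changes its state.
theorem pv_loop_guard_false (a b : Int) (h : ¬(PySem.Int.mod a 10 ≠ 0 ∧ PySem.Int.mod b 10 ≠ 0))
    (as : List Char) (st : Int × List Char) :
    as.foldl (fun (st : Int × List Char) i =>
      if i ∈ st.2 ∧ PySem.Int.mod a 10 ≠ 0 ∧ PySem.Int.mod b 10 ≠ 0 then
        (st.1 + 1, st.2.erase i)
      else st) st = st := by
  induction as generalizing st with
  | nil => rfl
  | cons i rest ih =>
      simp only [List.foldl_cons]
      rw [if_neg (fun hc => h hc.2), ih]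

-- With the guard true, A's loop computes the length of the bag intersection.
theorem pv_loop_bagInter (a b : Int) (ha : PySem.Int.mod a 10 ≠ 0) (hb : PySem.Int.mod b 10 ≠ 0)
    (as : List Char) (bs : List Char) (c : Int) :
    (as.foldl (fun (st : Int × List Char) i =>
      if i ∈ st.2 ∧ PySem.Int.mod a 10 ≠ 0 ∧ PySem.Int.mod b 10 ≠ 0 then
        (st.1 + 1, st.2.erase i)
      else st) (c, bs)).1 = c + ((as.bagInter bs).length : Int) := by
  induction as generalizing bs c with
  | nil => simp [List.nil_bagInter]
  | cons i rest ih =>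
      by_cases hm : i ∈ bs
      · have hcond : i ∈ bs ∧ PySem.Int.mod a 10 ≠ 0 ∧ PySem.Int.mod b 10 ≠ 0 := ⟨hm, ha, hb⟩
        simp only [List.foldl_cons, if_pos hcond]
        rw [ih, List.cons_bagInter_of_pos _ hm, List.length_cons]
        push_cast
        ring
      · have hcond : ¬(i ∈ bs ∧ PySem.Int.mod a 10 ≠ 0 ∧ PySem.Int.mod b 10 ≠ 0) :=
          fun hc => hm hc.1
        simp only [List.foldl_cons, if_neg hcond]
        rw [ih, List.cons_bagInter_of_neg _ hm]

-- Summing the counts of the members of a duplicate-free list F over a list m whose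
-- elements all lie in F gives m's length.
theorem pv_sum_count (F : List Char) (m : List Char) (hnd : F.Nodup) (hsub : ∀ x ∈ m, x ∈ F) :
    (F.map (fun d => m.count d)).sum = m.length := by
  induction F generalizing m with
  | nil =>
      cases m with
      | nil => rfl
      | cons x xs => exact absurd (hsub x (by simp)) (by simp)
  | cons d F' ih =>
      simp only [List.map_cons, List.sum_cons]
      have hnd' : F'.Nodup := hnd.of_cons
      have hdF' : d ∉ F' := by simpa using (List.nodup_cons.mp hnd).1
      have hcnt : ∀ e ∈ F', m.count e = (m.filter (fun x => !(x == d))).count e := by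
        intro e he
        have hne : ¬(e == d) = true := by
          simp only [beq_iff_eq]
          intro hed; exact hdF' (hed ▸ he)
        rw [List.count_filter]
        simp [hne]
      have hmap : (F'.map (fun e => m.count e)).sum
          = (F'.map (fun e => (m.filter (fun x => !(x == d))).count e)).sum :=
        congrArg List.sum (List.map_congr_left hcnt)
      have hsub' : ∀ x ∈ m.filter (fun y => !(y == d)), x ∈ F' := by
        intro x hx
        rcases List.mem_filter.mp hx with ⟨hxm, hxd⟩
        have hxd' : x ≠ d := by simpa using hxd
        have := hsub x hxm
        simp only [List.mem_cons] at this
        rcases this with h | h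
        · exact absurd h hxd'
        · exact h
      rw [hmap, ih _ hnd' hsub']
      have hlen : m.length = m.count d + (m.filter (fun x => !(x == d))).length := by
        rw [List.count_eq_countP, ← List.countP_eq_length_filter]
        have := List.length_eq_countP_add_countP (fun x => x == d) (l := m)
        simpa using this
      omega

-- B's sum of per-distinct-digit minimum counts is the bag-intersection length.
theorem pv_sum_min_eq (sa sb : List Char) :
    ((PySem.List.dedup sa).map (fun d => (min (sa.count d) (sb.count d) : Int))).sum
      = ((sa.bagInter sb).length : Int) := by
  have h1 : ∀ d : Char, (min (sa.count d) (sb.count d) : Int)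
      = (((sa.bagInter sb).count d : Nat) : Int) := by
    intro d
    rw [List.count_bagInter]
    push_cast
    rfl
  calc ((PySem.List.dedup sa).map (fun d => (min (sa.count d) (sb.count d) : Int))).sum
      = (((PySem.List.dedup sa).map (fun d => (sa.bagInter sb).count d)).map
          (fun n : Nat => (n : Int))).sum := by
        rw [List.map_map]
        exact congrArg List.sum (List.map_congr_left (fun d _ => h1 d))
    _ = ((((PySem.List.dedup sa).map (fun d => (sa.bagInter sb).count d)).sum : Nat) : Int) :=
        (Nat.cast_list_sum _).symm
    _ = ((sa.bagInter sb).length : Int) := by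
        congr 1
        apply pv_sum_count
        · simp [PySem.List.dedup_eq_ofList, PySem.Set.nodup_ofList]
        · intro x hx
          have : x ∈ sa := (List.mem_bagInter.mp hx).1
          simpa [PySem.List.dedup_eq_ofList, PySem.Set.mem_ofList] using this

-- ===== VERDICT (by name: the statement is the Claim_ definition above) =====
theorem digit_diff_spec : Claim_equal_digit_diff := by
  intro a b _
  unfold Spec_digit_diff digit_diff digit_diff_alt
  by_cases h : PySem.Int.mod a 10 = 0 ∨ PySem.Int.mod b 10 = 0
  · rw [if_pos h, pv_loop_guard_false a b (by tauto)]
  · push_neg at h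
    rw [if_neg (by tauto), pv_loop_bagInter a b h.1 h.2, pv_sum_min_eq]
    ring
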